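-- pv_equiv track=rewrite | github.com/chira-ploy/algorithm-DNAseq | alignment_naive_matching.py | naive_with_counts
-- ===== SOURCE A (Python) =====
-- def naive_with_counts(p,t):
--     """
--     Find exact occurrences of a pattern in a text and count the number of alignments and character comparisons.
--
--     Parameters:
--     - p (str): The pattern to search for in the text.
--     - t (str): The text where the pattern is to be searched.
--
--     Returns:
--     - tuple: A tuple containing three elements:
--         - list: A list containing the starting positions of exact occurrences of the pattern in the text.
--         - int: The number of alignments tried.
--         - int: The number of character comparisons performed.
--     """
--
--     occurrences = []
--     num_alignments = 0 #the number of alignments tried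
--     num_character_comparisons = 0 #the number of character comparisons performed
--
--     for i in range(len(t) - len(p) + 1):
--         match = True
--         num_alignments += 1
--         for j in range(len(p)):
--             num_character_comparisons += 1
--             if t[i+j] != p[j]:
--                 match = False
--                 break
--         if match:
--             occurrences.append(i)
--
--     return occurrences, num_alignments, num_character_comparisons
-- ===== SOURCE B (Python) =====
-- def naive_with_counts(p, t):
--     m = len(p)
--     survivors = list(range(len(t) - m + 1))
--     num_alignments = len(survivors)
--     num_character_comparisons = 0
--     for j in range(m):
--         num_character_comparisons += len(survivors)
--         survivors = [i for i in survivors if t[i + j] == p[j]]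
--     return survivors, num_alignments, num_character_comparisons
-- ===== Notes on version B (the rewrite author's own statement) =====
-- stated objective: alternative
-- what changed: B transposes the traversal: instead of a per-alignment inner character loop with a break, it makes one left-to-right sweep over pattern positions, maintaining a shrinking list of surviving alignments (filtered each round) and adding the list's length to the comparison count each round; survivors after the last round are the occurrences.
import Mathlib
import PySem

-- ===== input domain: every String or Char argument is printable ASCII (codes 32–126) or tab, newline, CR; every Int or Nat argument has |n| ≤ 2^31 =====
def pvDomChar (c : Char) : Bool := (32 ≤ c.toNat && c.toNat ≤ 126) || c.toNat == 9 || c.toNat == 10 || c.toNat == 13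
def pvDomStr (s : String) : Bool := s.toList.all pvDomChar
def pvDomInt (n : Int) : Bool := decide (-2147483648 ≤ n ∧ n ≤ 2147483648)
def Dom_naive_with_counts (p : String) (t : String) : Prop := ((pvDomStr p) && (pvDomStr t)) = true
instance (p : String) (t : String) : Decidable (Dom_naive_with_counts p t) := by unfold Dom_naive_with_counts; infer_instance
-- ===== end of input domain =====

-- B transposes the traversal: one sweep over pattern positions filtering a list of
-- surviving alignments, instead of A's per-alignment inner character loop.

-- ===== PORT A =====
-- inner loop of A: `for j in range(len(p)): num_cc += 1; if t[i+j] != p[j]: match = False; break`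
-- fuel = number of remaining iterations, j = current index, comps = comparison counter.
def pvInnerA (pl tl : List Char) (i : Int) : Nat → Int → Int → Bool × Int
  | 0, _, comps => (true, comps)
  | fuel+1, j, comps =>
      let comps := comps + 1
      match PySem.List.pyGet? tl (i + j), PySem.List.pyGet? pl j with
      | some tc, some pc =>
          if tc ≠ pc then (false, comps)
          else pvInnerA pl tl i fuel (j + 1) comps
      | _, _ => (false, comps)  -- IndexError; unreachable: A only indexes in range

-- body of A's outer loop (state = (occurrences, num_alignments, num_character_comparisons))
def pvStepA (pl tl : List Char) (st : List Int × Int × Int) (i : Int) : List Int × Int × Int :=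
  let na := st.2.1 + 1
  match pvInnerA pl tl i pl.length 0 st.2.2 with
  | (mtch, nc) => if mtch then (st.1 ++ [i], na, nc) else (st.1, na, nc)

def naive_with_counts (p : String) (t : String) : List Int × Int × Int :=
  let pl := p.toList
  let tl := t.toList
  (PySem.List.pyRange 0 ((tl.length : Int) - (pl.length : Int) + 1)).foldl
    (pvStepA pl tl) ([], 0, 0)

-- ===== PORT B =====
-- body of Source B's loop over j: comps += len(survivors); survivors = [i for i in survivors if t[i+j] == p[j]]
-- (indexing is always in range for reachable states, so the Option comparison is exact)
def pvStepB (pl tl : List Char) (st : List Int × Int) (j : Int) : List Int × Int :=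
  (st.1.filter (fun i => PySem.List.pyGet? tl (i + j) == PySem.List.pyGet? pl j),
   st.2 + (st.1.length : Int))

def naive_with_counts_alt (p : String) (t : String) : List Int × Int × Int :=
  let pl := p.toList
  let tl := t.toList
  let m : Int := pl.length
  let survivors := PySem.List.pyRange 0 ((tl.length : Int) - m + 1)
  let num_alignments : Int := survivors.length
  let fin := (PySem.List.pyRange 0 m).foldl (pvStepB pl tl) (survivors, 0)
  (fin.1, num_alignments, fin.2)

-- ===== PRECONDITION & SPEC =====
def Spec_naive_with_counts (p : String) (t : String) (out : List Int × Int × Int) : Prop := out = naive_with_counts_alt p t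
instance (p : String) (t : String) (out : List Int × Int × Int) : Decidable (Spec_naive_with_counts p t out) := by unfold Spec_naive_with_counts; infer_instance

-- ===== CLAIM (what is proved, stated in full; the proofs are below) =====
def Claim_equal_naive_with_counts : Prop := ∀ (p : String) (t : String), Dom_naive_with_counts p t → Spec_naive_with_counts p t (naive_with_counts p t)

-- ===== LEMMAS AND PROOFS =====

-- longest common prefix length, the yardstick both ports are measured against
def pvLcp : List Char → List Char → Int
  | x :: xs, y :: ys => if x ≠ y then 0 else pvLcp xs ys + 1
  | _, _ => 0

-- match length of alignment k
def pvEll (pl tl : List Char) (k : Nat) : Int := pvLcp pl (List.drop k tl)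

theorem pvLcp_nonneg : ∀ as bs : List Char, 0 ≤ pvLcp as bs := by
  intro as
  induction as with
  | nil => intro bs; simp [pvLcp]
  | cons a as ih =>
      intro bs
      cases bs with
      | nil => simp [pvLcp]
      | cons b bs =>
          simp only [pvLcp]
          split
          · omega
          · have := ih bs; omega

theorem pvLcp_le : ∀ as bs : List Char, pvLcp as bs ≤ (as.length : Int) := by
  intro as
  induction as with
  | nil => intro bs; simp [pvLcp]
  | cons a as ih =>
      intro bs
      cases bs with
      | nil => simp only [pvLcp, List.length_cons]; push_cast; positivity
      | cons b bs =>
          simp only [pvLcp, List.length_cons]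
          split
          · push_cast; positivity
          · have := ih bs; push_cast; omega

theorem pvLcp_succ_iff : ∀ (j : Nat) (as bs : List Char), j < as.length → j < bs.length →
    (((j : Int) + 1 ≤ pvLcp as bs) ↔ (((j : Int) ≤ pvLcp as bs) ∧ bs[j]? = as[j]?)) := by
  intro j
  induction j with
  | zero =>
      intro as bs ha hb
      cases as with
      | nil => simp at ha
      | cons a as =>
        cases bs with
        | nil => simp at hb
        | cons b bs =>
            simp only [pvLcp, List.getElem?_cons_zero, Nat.cast_zero, zero_add,
              Option.some.injEq]
            by_cases h : a = b
            · have := pvLcp_nonneg as bs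
              simp only [h, ne_eq, not_true_eq_false, if_false, and_true]
              omega
            · simp only [ne_eq, h, not_false_eq_true, if_true]
              constructor
              · omega
              · intro ⟨_, h2⟩; exact absurd h2.symm h
  | succ j ih =>
      intro as bs ha hb
      cases as with
      | nil => simp at ha
      | cons a as =>
        cases bs with
        | nil => simp at hb
        | cons b bs =>
            simp only [pvLcp, List.getElem?_cons_succ]
            have hiff := ih as bs (by simpa using ha) (by simpa using hb)
            have hnn := pvLcp_nonneg as bs
            by_cases h : a = b
            · simp only [ne_eq, h, not_true_eq_false, if_false]
              push_cast
              constructor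
              · intro hle
                have := hiff.mp (by omega)
                exact ⟨by omega, this.2⟩
              · intro ⟨h1, h2⟩
                have := hiff.mpr ⟨by omega, h2⟩
                omega
            · simp only [ne_eq, h, not_false_eq_true, if_true]
              omega

theorem pvInnerA_eq (pl tl : List Char) (i : Nat) :
    ∀ (fuel j : Nat) (comps : Int), fuel + j = pl.length → i + pl.length ≤ tl.length →
    pvInnerA pl tl (i : Int) fuel (j : Int) comps =
      (decide (pvLcp (pl.drop j) (tl.drop (i + j)) = (fuel : Int)),
       comps + min (pvLcp (pl.drop j) (tl.drop (i + j)) + 1) (fuel : Int)) := by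
  intro fuel
  induction fuel with
  | zero =>
      intro j comps hj _
      have : pl.drop j = [] := List.drop_eq_nil_of_le (by omega)
      simp [pvInnerA, this, pvLcp]
  | succ f ih =>
      intro j comps hj hlen
      have hjp : j < pl.length := by omega
      have hit : i + j < tl.length := by omega
      have hget_t : PySem.List.pyGet? tl ((i : Int) + (j : Int)) = some tl[i + j] := by
        rw [show ((i : Int) + (j : Int)) = ((i + j : Nat) : Int) by push_cast; ring]
        rw [PySem.List.pyGet?_natCast]
        simp [List.getElem?_eq_getElem hit]
      have hget_p : PySem.List.pyGet? pl ((j : Int)) = some pl[j] := by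
        rw [PySem.List.pyGet?_natCast]
        simp [List.getElem?_eq_getElem hjp]
      have hdp : pl.drop j = pl[j] :: pl.drop (j + 1) := List.drop_eq_getElem_cons hjp
      have hdt : tl.drop (i + j) = tl[i + j] :: tl.drop (i + j + 1) := List.drop_eq_getElem_cons hit
      by_cases hc : tl[i + j] ≠ pl[j]
      · have hlcp : pvLcp (pl.drop j) (tl.drop (i + j)) = 0 := by
          rw [hdp, hdt]; simp [pvLcp]; intro h; exact absurd h.symm hc
        simp only [pvInnerA, hget_t, hget_p]
        rw [if_pos hc, hlcp]
        simp only [Prod.mk.injEq]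
        refine ⟨?_, ?_⟩
        · simp; omega
        · omega
      · rw [not_not] at hc
        have hstep : pvInnerA pl tl (i : Int) (f + 1) (j : Int) comps
            = pvInnerA pl tl (i : Int) f ((j : Int) + 1) (comps + 1) := by
          simp only [pvInnerA, hget_t, hget_p]
          rw [if_neg (by simp [hc])]
        rw [hstep, show ((j : Int) + 1) = ((j + 1 : Nat) : Int) by push_cast; ring,
            ih (j + 1) (comps + 1) (by omega) hlen]
        have hlcp : pvLcp (pl.drop j) (tl.drop (i + j)) = pvLcp (pl.drop (j + 1)) (tl.drop (i + j + 1)) + 1 := by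
          rw [hdp, hdt]; simp [pvLcp, hc]
        have hnn := pvLcp_nonneg (pl.drop (j + 1)) (tl.drop (i + j + 1))
        rw [show i + (j + 1) = i + j + 1 by omega, hlcp]
        simp only [Prod.mk.injEq]
        refine ⟨?_, ?_⟩
        · rw [decide_eq_decide]
          push_cast
          omega
        · push_cast
          omega

theorem pvFoldA (pl tl : List Char) :
    ∀ (K : Nat), (∀ k, k < K → k + pl.length ≤ tl.length) → ∀ (occ : List Int) (na nc : Int),
      ((List.range K).map (fun (k : Nat) => (k : Int))).foldl (pvStepA pl tl) (occ, na, nc) =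
        (occ ++ (List.range K).filterMap
            (fun k => if pvEll pl tl k = (pl.length : Int) then some ((k : Int)) else none),
         na + K,
         nc + ((List.range K).map (fun k => min (pvEll pl tl k + 1) (pl.length : Int))).sum) := by
  intro K
  induction K with
  | zero => intro _ occ na nc; simp
  | succ K ih =>
      intro hK occ na nc
      rw [List.range_succ, List.map_append, List.foldl_append,
          ih (fun k hk => hK k (by omega))]
      have hinner := pvInnerA_eq pl tl K pl.length 0
        (nc + ((List.range K).map (fun k => min (pvEll pl tl k + 1) (pl.length : Int))).sum)
        (by omega) (hK K (by omega))
      simp only [List.drop_zero, Nat.add_zero, Nat.cast_zero, pvEll] at hinner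
      simp only [pvEll]
      simp only [List.map_append, List.filterMap_append, List.sum_append, List.map_cons,
        List.map_nil, List.filterMap_cons, List.filterMap_nil, List.sum_cons, List.sum_nil,
        List.foldl_cons, List.foldl_nil, pvStepA, hinner]
      by_cases hm : pvLcp pl (tl.drop K) = (pl.length : Int)
      · simp only [hm, decide_true, if_true, Prod.mk.injEq]
        refine ⟨by simp [List.append_assoc], by push_cast; ring, by omega⟩
      · simp only [hm, decide_false, if_false, Prod.mk.injEq, Bool.false_eq_true]
        refine ⟨by simp, by push_cast; ring, by ring⟩

theorem pvPyRange_zero (N : Int) : PySem.List.pyRange 0 N = (List.range N.toNat).map (fun (k : Nat) => (k : Int)) := by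
  by_cases h : 0 ≤ N
  · conv_lhs => rw [show N = ((N.toNat : Nat) : Int) by omega]
    rw [PySem.List.pyRange_zero_natCast]
  · have h1 : PySem.List.pyRange 0 N = [] := by
      rw [List.eq_nil_iff_forall_not_mem]
      intro x hx
      rw [PySem.List.mem_pyRange_one] at hx
      omega
    have h2 : N.toNat = 0 := by omega
    simp [h1, h2]

-- length of an if-some filterMap as an Int sum of indicator values
theorem pvLenFM (L : List Nat) (c : Nat → Prop) [DecidablePred c] (f : Nat → Int) :
    (((L.filterMap (fun k => if c k then some (f k) else none)).length : Nat) : Int)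
      = (L.map (fun k => if c k then (1 : Int) else 0)).sum := by
  induction L with
  | nil => simp
  | cons a L ih =>
      by_cases h : c a
      · simp [h, ih]; ring
      · simp [h, ih]

theorem pvSumAdd (L : List Nat) (f g : Nat → Int) :
    (L.map f).sum + (L.map g).sum = (L.map (fun k => f k + g k)).sum := by
  induction L with
  | nil => simp
  | cons a L ih => simp only [List.map_cons, List.sum_cons]; rw [← ih]; ring

-- one filtering round of B advances the survivor condition from J to J+1
theorem pvFilterStep (pl tl : List Char) (J : Nat) (hJ : J < pl.length) :
    ∀ L : List Nat, (∀ k ∈ L, k + pl.length ≤ tl.length) →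
    ((L.filterMap (fun k => if (J : Int) ≤ pvEll pl tl k then some ((k : Int)) else none)).filter
        (fun i => PySem.List.pyGet? tl (i + (J : Int)) == PySem.List.pyGet? pl (J : Int)))
      = L.filterMap (fun k => if (J : Int) + 1 ≤ pvEll pl tl k then some ((k : Int)) else none) := by
  intro L
  induction L with
  | nil => intro _; simp
  | cons k L ih =>
      intro hb
      have hk : k + pl.length ≤ tl.length := hb k (by simp)
      have hkt : k + J < tl.length := by omega
      have hJd : J < (tl.drop k).length := by simp [List.length_drop]; omega
      have hiff := pvLcp_succ_iff J pl (tl.drop k) hJ hJd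
      rw [List.getElem?_drop] at hiff
      have hcond : (PySem.List.pyGet? tl ((k : Int) + (J : Int)) == PySem.List.pyGet? pl (J : Int))
          = (tl[k + J]? == pl[J]?) := by
        rw [show ((k : Int) + (J : Int)) = ((k + J : Nat) : Int) by push_cast; ring,
            PySem.List.pyGet?_natCast, PySem.List.pyGet?_natCast]
      have ihL := ih (fun x hx => hb x (by simp [hx]))
      by_cases hle : (J : Int) ≤ pvEll pl tl k
      · rw [List.filterMap_cons, if_pos hle]
        by_cases heq : tl[k + J]? = pl[J]?
        · have h1 : (J : Int) + 1 ≤ pvEll pl tl k := hiff.mpr ⟨hle, heq⟩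
          rw [List.filter_cons_of_pos (by rw [hcond]; exact beq_iff_eq.mpr heq),
              ihL, List.filterMap_cons, if_pos h1]
        · have h1 : ¬ ((J : Int) + 1 ≤ pvEll pl tl k) := fun h => heq (hiff.mp h).2
          rw [List.filter_cons_of_neg (by rw [hcond]; simpa using heq),
              ihL, List.filterMap_cons, if_neg h1]
      · have h1 : ¬ ((J : Int) + 1 ≤ pvEll pl tl k) := fun h => hle (by omega)
        rw [List.filterMap_cons, if_neg hle, ihL, List.filterMap_cons, if_neg h1]

-- invariant of B's sweep: after J rounds, survivors are the alignments with match length ≥ J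
-- and comps = Σ min(ell+1, J)
theorem pvFoldB (pl tl : List Char) (K : Nat) (hK : ∀ k, k < K → k + pl.length ≤ tl.length) :
    ∀ (J : Nat), J ≤ pl.length →
    ((List.range J).map (fun (j : Nat) => (j : Int))).foldl (pvStepB pl tl)
        ((List.range K).map (fun (k : Nat) => (k : Int)), 0)
      = ((List.range K).filterMap (fun k => if (J : Int) ≤ pvEll pl tl k then some ((k : Int)) else none),
         ((List.range K).map (fun k => min (pvEll pl tl k + 1) (J : Int))).sum) := by
  intro J
  induction J with
  | zero =>
      intro _
      simp only [List.range_zero, List.map_nil, List.foldl_nil, Nat.cast_zero, Prod.mk.injEq]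
      constructor
      · symm
        rw [List.filterMap_congr (g := fun k => some ((k : Nat) : Int))
            (by intro k _; exact if_pos (pvLcp_nonneg pl (List.drop k tl)))]
        simp
      · symm
        rw [List.map_congr_left (g := fun _ => (0 : Int))
            (by intro k _
                have h0 : 0 ≤ pvEll pl tl k := pvLcp_nonneg pl (List.drop k tl)
                show min (pvEll pl tl k + 1) 0 = 0
                omega)]
        simp
  | succ J ih =>
      intro hJ
      have hJlt : J < pl.length := by omega
      rw [List.range_succ, List.map_append, List.foldl_append, ih (by omega)]
      simp only [List.map_cons, List.map_nil, List.foldl_cons, List.foldl_nil, pvStepB,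
        Prod.mk.injEq]
      constructor
      · rw [pvFilterStep pl tl J hJlt (List.range K) (fun k hk => hK k (by simpa using hk))]
        apply List.filterMap_congr
        intro k _
        norm_cast
      · rw [pvLenFM (List.range K) (fun k => (J : Int) ≤ pvEll pl tl k) (fun k => (k : Int)),
            pvSumAdd]
        congr 1
        apply List.map_congr_left
        intro k _
        have h0 : 0 ≤ pvEll pl tl k := pvLcp_nonneg pl (List.drop k tl)
        push_cast
        split <;> omega

theorem pvMain (pl tl : List Char) :
    (PySem.List.pyRange 0 ((tl.length : Int) - (pl.length : Int) + 1)).foldl (pvStepA pl tl) ([], 0, 0)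
      = (((PySem.List.pyRange 0 ((pl.length : Int))).foldl (pvStepB pl tl)
            (PySem.List.pyRange 0 ((tl.length : Int) - (pl.length : Int) + 1), 0)).1,
         ((PySem.List.pyRange 0 ((tl.length : Int) - (pl.length : Int) + 1)).length : Int),
         ((PySem.List.pyRange 0 ((pl.length : Int))).foldl (pvStepB pl tl)
            (PySem.List.pyRange 0 ((tl.length : Int) - (pl.length : Int) + 1), 0)).2) := by
  have hK : ∀ k, k < ((tl.length : Int) - (pl.length : Int) + 1).toNat → k + pl.length ≤ tl.length := by
    intro k hk; omega
  have hmN : ((pl.length : Int)).toNat = pl.length := by omega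
  rw [pvPyRange_zero ((tl.length : Int) - (pl.length : Int) + 1), pvPyRange_zero ((pl.length : Int)), hmN,
      pvFoldA pl tl _ hK [] 0 0,
      pvFoldB pl tl _ hK pl.length (le_refl _)]
  simp only [List.nil_append, zero_add, List.length_map, List.length_range, Prod.mk.injEq,
    and_true]
  apply List.filterMap_congr
  intro k _
  have h1 : pvEll pl tl k ≤ (pl.length : Int) := pvLcp_le pl (List.drop k tl)
  by_cases h : pvEll pl tl k = (pl.length : Int)
  · rw [if_pos h, if_pos (by omega)]
  · rw [if_neg h, if_neg (by omega)]

-- ===== VERDICT (by name: the statement is the Claim_ definition above) =====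
theorem naive_with_counts_spec : Claim_equal_naive_with_counts := by
  intro p t _
  show naive_with_counts p t = naive_with_counts_alt p t
  simp only [naive_with_counts, naive_with_counts_alt]
  exact pvMain p.toList t.toList
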